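-- pv_equiv track=rewrite | github.com/gridcase1590/Sha256-4letters-speedrun-any- | gamma_inverter_v5.py | read_at_scale
-- ===== SOURCE A (Python) =====
-- def read_at_scale(bits, start, end, scale):
--     seg = bits[start:end]
--     n = len(seg)
--     part = max(1, n // scale)
--     counts = []
--     for i in range(min(scale, n)):
--         ps = i * part
--         pe = min(ps + part, n)
--         counts.append(sum(seg[ps:pe]))
--     return counts
-- ===== SOURCE B (Python) =====
-- def read_at_scale(bits, start, end, scale):
--     seg = bits[start:end]
--     n = len(seg)
--     part = max(1, n // scale)
--     pref = [0]
--     for v in seg: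
--         pref.append(pref[-1] + v)
--     return [pref[min(i * part + part, n)] - pref[i * part]
--             for i in range(min(scale, n))]
-- ===== Notes on version B (the rewrite author's own statement) =====
-- stated objective: alternative
-- what changed: B builds a prefix-sum table over the segment once and computes each chunk total as a difference of two prefix sums, instead of re-slicing and re-summing the segment for every chunk.
import Mathlib
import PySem

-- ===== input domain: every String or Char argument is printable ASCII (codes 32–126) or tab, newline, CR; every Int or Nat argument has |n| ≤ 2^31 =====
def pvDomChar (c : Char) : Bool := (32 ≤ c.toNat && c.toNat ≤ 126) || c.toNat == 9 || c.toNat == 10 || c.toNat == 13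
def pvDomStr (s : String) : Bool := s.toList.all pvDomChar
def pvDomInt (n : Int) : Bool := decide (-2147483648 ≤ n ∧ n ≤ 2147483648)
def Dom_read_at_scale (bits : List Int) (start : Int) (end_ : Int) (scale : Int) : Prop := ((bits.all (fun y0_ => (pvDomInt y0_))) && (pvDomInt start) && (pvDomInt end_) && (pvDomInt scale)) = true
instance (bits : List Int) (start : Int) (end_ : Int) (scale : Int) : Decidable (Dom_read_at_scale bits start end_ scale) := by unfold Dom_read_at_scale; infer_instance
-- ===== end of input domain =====

-- B computes each chunk total from a prefix-sum table built once over the segment,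
-- replacing A's per-chunk re-slice-and-sum; same results, different traversal (alternative).


-- ===== PORT A =====
def read_at_scale (bits : List Int) (start : Int) (end_ : Int) (scale : Int) : List Int :=
  let seg := PySem.List.slice bits (some start) (some end_)
  let n : Int := seg.length
  let part : Int := max 1 (PySem.Int.floordiv n scale)
  (PySem.List.pyRange 0 (min scale n) 1).foldl
    (fun counts i =>
      let ps := i * part
      let pe := min (ps + part) n
      counts ++ [(PySem.List.slice seg (some ps) (some pe)).sum]) []

-- ===== PORT B =====
def read_at_scale_alt (bits : List Int) (start : Int) (end_ : Int) (scale : Int) : List Int :=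
  let seg := PySem.List.slice bits (some start) (some end_)
  let n : Int := seg.length
  let part : Int := max 1 (PySem.Int.floordiv n scale)
  let pref := seg.foldl (fun p v => p ++ [PySem.List.pyGetD p (-1) 0 + v]) [0]
  (PySem.List.pyRange 0 (min scale n) 1).map
    (fun i => PySem.List.pyGetD pref (min (i * part + part) n) 0
              - PySem.List.pyGetD pref (i * part) 0)

-- ===== PRECONDITION & SPEC =====
-- Python raises ZeroDivisionError (in both A and B) exactly when scale = 0.
def Pre_read_at_scale (bits : List Int) (start : Int) (end_ : Int) (scale : Int) : Prop := scale ≠ 0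
instance (bits : List Int) (start : Int) (end_ : Int) (scale : Int) : Decidable (Pre_read_at_scale bits start end_ scale) := by unfold Pre_read_at_scale; infer_instance
def pvWitness_read_at_scale : List Int × Int × Int × Int := ([3, 1, 4, 1, 5, 9], 0, 6, 3)
def Spec_read_at_scale (bits : List Int) (start : Int) (end_ : Int) (scale : Int) (out : List Int) : Prop := out = read_at_scale_alt bits start end_ scale
instance (bits : List Int) (start : Int) (end_ : Int) (scale : Int) (out : List Int) : Decidable (Spec_read_at_scale bits start end_ scale out) := by unfold Spec_read_at_scale; infer_instance

-- ===== CLAIM (what is proved, stated in full; the proofs are below) =====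
def Claim_equal_read_at_scale : Prop := ∀ (bits : List Int) (start : Int) (end_ : Int) (scale : Int), Dom_read_at_scale bits start end_ scale → Pre_read_at_scale bits start end_ scale → Spec_read_at_scale bits start end_ scale (read_at_scale bits start end_ scale)

-- ===== LEMMAS AND PROOFS =====

-- the pure prefix-sum list that B's fold computes: psums seg a = [a, a+seg0, a+seg0+seg1, …]
def psums : List Int → Int → List Int
  | [], a => [a]
  | v :: t, a => a :: psums t (a + v)

theorem psums_length (seg : List Int) (a : Int) : (psums seg a).length = seg.length + 1 := by
  induction seg generalizing a with
  | nil => rfl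
  | cons v t ih => simp [psums, ih]

theorem foldl_pref (seg : List Int) (acc : List Int) (a : Int) :
    seg.foldl (fun p v => p ++ [PySem.List.pyGetD p (-1) 0 + v]) (acc ++ [a]) =
      acc ++ psums seg a := by
  induction seg generalizing acc a with
  | nil => simp [psums]
  | cons v t ih =>
    simp only [List.foldl_cons, PySem.List.pyGetD_neg_one_append_singleton, psums]
    have := ih (acc ++ [a]) (a + v)
    simpa using this

theorem psums_getD (seg : List Int) (a : Int) (k : Nat) (hk : k ≤ seg.length) :
    (psums seg a).getD k 0 = a + (seg.take k).sum := by
  induction seg generalizing a k with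
  | nil =>
    have hk0 : k = 0 := Nat.le_zero.mp hk
    subst hk0; simp [psums]
  | cons v t ih =>
    cases k with
    | zero => simp [psums]
    | succ k =>
      simp only [psums, List.getD_cons_succ, List.take_succ_cons, List.sum_cons]
      rw [ih (a + v) k (by simpa using hk)]
      ring

theorem sum_take_sub (seg : List Int) (s m : Nat) :
    ((seg.drop s).take m).sum = (seg.take (s + m)).sum - (seg.take s).sum := by
  rw [List.take_add, List.sum_append]; ring

theorem read_at_scale_eq (bits : List Int) (start : Int) (end_ : Int) (scale : Int)
    (_hs : scale ≠ 0) :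
    read_at_scale bits start end_ scale = read_at_scale_alt bits start end_ scale := by
  unfold read_at_scale read_at_scale_alt
  dsimp only
  set seg := PySem.List.slice bits (some start) (some end_) with hseg
  set n : Int := (seg.length : Int) with hn
  set part : Int := max 1 (PySem.Int.floordiv n scale) with hpart
  have hpref : seg.foldl (fun p v => p ++ [PySem.List.pyGetD p (-1) 0 + v]) [0] =
      psums seg 0 := by
    have := foldl_pref seg [] 0
    simpa using this
  rw [hpref, PySem.List.foldl_append_singleton_eq_map]
  apply List.map_congr_left
  intro i hi
  have hmem := (PySem.List.mem_pyRange_one).mp hi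
  have hi0 : 0 ≤ i := hmem.1
  have hilt : i < min scale n := hmem.2
  have hin : i < n := lt_of_lt_of_le hilt (min_le_right _ _)
  have hpart1 : 1 ≤ part := le_max_left _ _
  -- ps = i * part satisfies 0 ≤ ps < n
  have hpsn : i * part < n := by
    rcases le_or_gt (PySem.Int.floordiv n scale) 1 with hle | hgt
    · have : part = 1 := by omega
      rw [this]; simpa using hin
    · -- part = n // scale, and scale > 0 (for scale < 0 the quotient is ≤ 0 since 0 ≤ n)
      have hn0 : (0:Int) ≤ n := by simp [hn]
      have hscpos : 0 < scale := by
        by_contra h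
        have hneg : scale < 0 := by omega
        have := (PySem.Int.mod_neg_bounds (a := n) hneg).2
        have hdm := PySem.Int.floordiv_mul_add_mod n scale
        nlinarith [hgt]
      have hpeq : part = PySem.Int.floordiv n scale := by omega
      have hmod0 : 0 ≤ PySem.Int.mod n scale := PySem.Int.mod_nonneg (a := n) hscpos
      have hdm := PySem.Int.floordiv_mul_add_mod n scale
      have hisc : i ≤ scale - 1 := by
        have := lt_of_lt_of_le hilt (min_le_left _ _); omega
      calc i * part ≤ (scale - 1) * part := by nlinarith
        _ = scale * part - part := by ring
        _ ≤ n - part := by nlinarith [hpeq, hdm, hmod0]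
        _ < n := by omega
  have hps0 : 0 ≤ i * part := mul_nonneg hi0 (by omega)
  set ps := i * part with hps
  set pe := min (ps + part) n with hpe
  have hpspe : ps < pe := by simp only [hpe]; omega
  have hpen : pe ≤ n := min_le_right _ _
  have hpe0 : 0 ≤ pe := by omega
  -- rewrite the two pyGetD lookups into psums into take-sums
  have hlen : (psums seg 0).length = seg.length + 1 := psums_length seg 0
  have hgd : ∀ j : Int, 0 ≤ j → j ≤ n →
      PySem.List.pyGetD (psums seg 0) j 0 = (seg.take j.toNat).sum := by
    intro j hj0 hjn
    have hj : j = ((j.toNat : Nat) : Int) := by omega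
    have hps := psums_getD seg 0 j.toNat (by omega)
    rw [hj, PySem.List.pyGetD_natCast]
    simpa [max_eq_left hj0] using hps
  rw [hgd ps hps0 (by omega), hgd pe hpe0 hpen]
  -- the slice sum on A's side
  rw [PySem.List.slice_toNat seg hps0 hpe0]
  rw [sum_take_sub seg ps.toNat (pe.toNat - ps.toNat)]
  have : ps.toNat + (pe.toNat - ps.toNat) = pe.toNat := by omega
  rw [this]

-- ===== VERDICT (by name: the statement is the Claim_ definition above) =====
theorem read_at_scale_spec : Claim_equal_read_at_scale := by
  intro bits start end_ scale _ hpre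
  unfold Spec_read_at_scale
  exact read_at_scale_eq bits start end_ scale hpre
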